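-- pv_equiv track=rewrite | github.com/pypi-data/pypi-mirror-26 | packages/velenxc/velenxc-0.1.20171104181412.tar.gz/velenxc-0.1.20171104181412/velenxc/funclibs/m.py | m_transform_by_key
-- ===== SOURCE A (Python) =====
-- def m_transform_by_key(seq):
--     """ 按照key分组，并返回相同分组的最大值构成的列表
--         如：[('a', 2000), ('b', 3000), ('a', 3000)]  -> [3000, 3000]
--     """
--     group_by_key = {}
--
--     for item in seq:
--         if item[0] not in group_by_key:
--             group_by_key[item[0]] = [item[1]]
--             continue
--
--         group_by_key[item[0]].append(item[1])
--
--     return [max(v) for v in group_by_key.values()]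
-- ===== SOURCE B (Python) =====
-- def m_transform_by_key(seq):
--     """Single pass: dict from key to its running maximum, first-appearance key order."""
--     best = {}
--     for key, value in seq:
--         if key in best:
--             if value > best[key]:
--                 best[key] = value
--         else:
--             best[key] = value
--     return list(best.values())
-- ===== Notes on version B (the rewrite author's own statement) =====
-- stated objective: simpler
-- what changed: B keeps a dict of running maxima updated in one pass instead of building per-key lists and running a second max() pass over every group.
import Mathlib
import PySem

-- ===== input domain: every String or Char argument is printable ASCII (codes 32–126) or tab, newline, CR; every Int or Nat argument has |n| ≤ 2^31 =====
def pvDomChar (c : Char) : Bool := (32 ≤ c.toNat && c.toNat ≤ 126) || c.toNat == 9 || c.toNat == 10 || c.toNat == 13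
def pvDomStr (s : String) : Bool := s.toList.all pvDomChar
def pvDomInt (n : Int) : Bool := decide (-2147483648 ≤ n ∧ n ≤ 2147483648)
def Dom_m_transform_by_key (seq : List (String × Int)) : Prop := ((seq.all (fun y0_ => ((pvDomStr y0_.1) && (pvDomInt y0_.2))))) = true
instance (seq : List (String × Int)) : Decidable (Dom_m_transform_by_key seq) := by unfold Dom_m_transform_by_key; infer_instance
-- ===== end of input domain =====

-- B replaces A's per-key group lists + second max() pass by a single-pass dict of running maxima (simpler).


-- ===== PORT A =====
def m_transform_by_key (seq : List (String × Int)) : List Int :=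
  let group_by_key : PySem.Dict String (List Int) :=
    seq.foldl (fun d item =>
      if d.contains item.1 = false then d.insert item.1 [item.2]
      else d.modify item.1 [] (· ++ [item.2]))   -- group_by_key[item[0]].append(item[1])
      PySem.Dict.empty
  -- max(v): every stored list is nonempty by construction, so max? is some and the 0 default is never used
  group_by_key.values.map (fun v => (PySem.List.max? v (fun x => x)).getD 0)

-- ===== PORT B =====
def m_transform_by_key_alt (seq : List (String × Int)) : List Int :=
  (seq.foldl (fun best p =>
      if best.contains p.1 then
        (if p.2 > best.getD p.1 0 then best.insert p.1 p.2 else best)  -- best[key]: key present, default unused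
      else best.insert p.1 p.2)
    PySem.Dict.empty).values

-- ===== PRECONDITION & SPEC =====
def Spec_m_transform_by_key (seq : List (String × Int)) (out : List Int) : Prop := out = m_transform_by_key_alt seq
instance (seq : List (String × Int)) (out : List Int) : Decidable (Spec_m_transform_by_key seq out) := by unfold Spec_m_transform_by_key; infer_instance

-- ===== CLAIM (what is proved, stated in full; the proofs are below) =====
def Claim_equal_m_transform_by_key : Prop := ∀ (seq : List (String × Int)), Dom_m_transform_by_key seq → Spec_m_transform_by_key seq (m_transform_by_key seq)

-- ===== LEMMAS AND PROOFS =====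

/-- max of a nonempty list as A computes it (0 is a dummy for []). -/
def pvMx (l : List Int) : Int :=
  match l with
  | [] => 0
  | x :: t => t.foldl max x

theorem pvMx_append (l : List Int) (hl : l ≠ []) (v : Int) :
    pvMx (l ++ [v]) = max (pvMx l) v := by
  cases l with
  | nil => exact absurd rfl hl
  | cons x t => simp [pvMx, List.foldl_append]

/-- loop invariant tying A's dict of group lists to B's dict of running maxima -/
def pvInv (dA : PySem.Dict String (List Int)) (dB : PySem.Dict String Int) : Prop :=
  dB.items = dA.items.map (fun p => (p.1, pvMx p.2)) ∧
  dA.keys.Nodup ∧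
  ∀ p ∈ dA.items, p.2 ≠ []

theorem pvInv_keys {dA : PySem.Dict String (List Int)} {dB : PySem.Dict String Int}
    (h : pvInv dA dB) : dB.keys = dA.keys := by
  obtain ⟨hi, _, _⟩ := h
  simp only [PySem.Dict.keys, hi, List.map_map]
  rfl

theorem pvInv_contains {dA : PySem.Dict String (List Int)} {dB : PySem.Dict String Int}
    (h : pvInv dA dB) (k : String) : dB.contains k = dA.contains k := by
  rw [PySem.Dict.contains_eq_decide_mem_keys, PySem.Dict.contains_eq_decide_mem_keys,
    pvInv_keys h]

theorem pvInv_step (dA : PySem.Dict String (List Int)) (dB : PySem.Dict String Int)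
    (h : pvInv dA dB) (k : String) (v : Int) :
    pvInv (if dA.contains k = false then dA.insert k [v] else dA.modify k [] (· ++ [v]))
          (if dB.contains k then (if v > dB.getD k 0 then dB.insert k v else dB)
           else dB.insert k v) := by
  obtain ⟨hi, hnd, hne⟩ := h
  have hck := pvInv_contains ⟨hi, hnd, hne⟩ k
  by_cases hc : dA.contains k = true
  · -- key already present
    rw [if_neg (by simp [hc]), if_pos (by rw [hck]; exact hc)]
    -- A's modify is insert of the appended list
    have hmod : dA.modify k [] (· ++ [v]) = dA.insert k (dA.getD k [] ++ [v]) := rfl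
    obtain ⟨l, hl⟩ := Option.isSome_iff_exists.mp (by
      rw [← PySem.Dict.contains_eq_isSome_get? dA k]; exact hc)
    have hlmem : (k, l) ∈ dA.items := PySem.Dict.mem_items_of_get?_eq_some dA hl
    have hlne : l ≠ [] := hne _ hlmem
    have hgA : dA.getD k [] = l := PySem.Dict.getD_of_get?_eq_some dA [] hl
    have hndB : dB.keys.Nodup := by rw [pvInv_keys ⟨hi, hnd, hne⟩]; exact hnd
    have hgB : dB.getD k 0 = pvMx l := by
      have : (k, pvMx l) ∈ dB.items := by
        rw [hi]; exact List.mem_map.mpr ⟨(k, l), hlmem, rfl⟩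
      exact PySem.Dict.getD_of_mem_items dB this hndB 0
    have hcB : dB.contains k = true := by rw [hck]; exact hc
    -- the replaced entry at key k is (k, l): nodup keys force p.2 = l when p.1 = k
    have hkey : ∀ p ∈ dA.items, p.1 = k → p.2 = l := by
      intro p hp hpk
      have := PySem.Dict.get?_of_mem_items dA hp hnd
      rw [hpk, hl] at this
      exact (Option.some_inj.mp this).symm
    have hitemsA : (dA.insert k (l ++ [v])).items
        = dA.items.map (fun p => if p.1 == k then (k, l ++ [v]) else p) := by
      rw [PySem.Dict.items_insert_of_contains dA _ hc]
    refine ⟨?_, ?_, ?_⟩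
    · rw [hmod, hgA, hitemsA, List.map_map]
      by_cases hv : v > dB.getD k 0
      · rw [if_pos hv, PySem.Dict.items_insert_of_contains dB _ hcB, hi, List.map_map]
        apply List.map_congr_left
        intro p hp
        simp only [Function.comp]
        by_cases hpk : p.1 = k
        · have hpl := hkey p hp hpk
          simp only [hpk, beq_self_eq_true, if_pos]
          have : pvMx (l ++ [v]) = v := by
            rw [pvMx_append l hlne v]
            rw [hgB] at hv; omega
          simp [this]
        · simp [beq_eq_false_iff_ne.mpr hpk]
      · rw [if_neg hv, hi]
        apply List.map_congr_left
        intro p hp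
        simp only [Function.comp]
        by_cases hpk : p.1 = k
        · have hpl := hkey p hp hpk
          simp only [hpk, beq_self_eq_true, if_pos]
          have : pvMx (l ++ [v]) = pvMx l := by
            rw [pvMx_append l hlne v]
            rw [hgB] at hv; omega
          simp [hpl, this]
        · simp [beq_eq_false_iff_ne.mpr hpk]
    · rw [hmod, PySem.Dict.keys_insert_of_contains dA _ hc]; exact hnd
    · intro p hp
      rw [hmod, hgA, hitemsA] at hp
      obtain ⟨q, hq, hqe⟩ := List.mem_map.mp hp
      by_cases hqk : q.1 = k
      · simp only [hqk, beq_self_eq_true, if_pos] at hqe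
        rw [← hqe]; simp
      · rw [if_neg (by simp [hqk])] at hqe
        rw [← hqe]; exact hne q hq
  · -- fresh key
    have hcf : dA.contains k = false := by simpa using hc
    rw [if_pos hcf, if_neg (by rw [hck, hcf]; simp)]
    have hkmem : k ∉ dA.keys := by
      intro hm
      rw [PySem.Dict.contains_eq_decide_mem_keys] at hcf
      simp [hm] at hcf
    refine ⟨?_, ?_, ?_⟩
    · rw [PySem.Dict.items_insert_of_not_contains dA _ hcf,
        PySem.Dict.items_insert_of_not_contains dB _ (by rw [hck]; exact hcf),
        hi, List.map_append]
      rfl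
    · rw [PySem.Dict.keys_insert_of_not_contains dA _ hcf]
      exact List.nodup_append.mpr ⟨hnd, List.nodup_singleton _, by
        intro a ha b hb
        simp at hb
        subst hb
        exact fun h => hkmem (h ▸ ha)⟩
    · intro p hp
      rw [PySem.Dict.items_insert_of_not_contains dA _ hcf] at hp
      rcases List.mem_append.mp hp with h1 | h1
      · exact hne p h1
      · simp at h1; rw [h1]; simp

theorem pvInv_fold (seq : List (String × Int)) (dA : PySem.Dict String (List Int))
    (dB : PySem.Dict String Int) (h : pvInv dA dB) :
    pvInv (seq.foldl (fun d item =>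
            if d.contains item.1 = false then d.insert item.1 [item.2]
            else d.modify item.1 [] (· ++ [item.2])) dA)
          (seq.foldl (fun best p =>
            if best.contains p.1 then
              (if p.2 > best.getD p.1 0 then best.insert p.1 p.2 else best)
            else best.insert p.1 p.2) dB) := by
  induction seq generalizing dA dB with
  | nil => exact h
  | cons x t ih => exact ih _ _ (pvInv_step dA dB h x.1 x.2)

theorem pvMax_getD_eq (l : List Int) (hl : l ≠ []) :
    (PySem.List.max? l (fun x => x)).getD 0 = pvMx l := by
  cases l with
  | nil => exact absurd rfl hl
  | cons x t => rw [PySem.List.max?_id_cons]; rfl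

-- ===== VERDICT (by name: the statement is the Claim_ definition above) =====
theorem m_transform_by_key_spec : Claim_equal_m_transform_by_key := by
  intro seq _
  unfold Spec_m_transform_by_key m_transform_by_key m_transform_by_key_alt
  have h := pvInv_fold seq PySem.Dict.empty PySem.Dict.empty
    ⟨by simp [PySem.Dict.empty], by simp [PySem.Dict.keys, PySem.Dict.empty],
     by simp [PySem.Dict.empty]⟩
  obtain ⟨hi, _, hne⟩ := h
  simp only [PySem.Dict.values, hi, List.map_map]
  apply List.map_congr_left
  intro p hp
  simp only [Function.comp]
  exact pvMax_getD_eq p.2 (hne p hp)
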